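-- pv_equiv track=rewrite | github.com/benclawbot/liquidity-pulse | backend/utils/source_meta.py | aggregate_source_status
-- ===== SOURCE A (Python) =====
-- from collections.abc import Mapping
--
-- SOURCE_STATES = {"live", "cached", "fallback", "unavailable"}
--
-- def normalize_source_state(value: str | None) -> str:
--     if value in SOURCE_STATES:
--         return value
--     return "fallback"
--
-- def aggregate_source_status(sources: Mapping[str, str] | None) -> str:
--     if not sources:
--         return "unavailable"
--
--     states = {normalize_source_state(value) for value in sources.values()}
--     if states == {"live"}:
--         return "live"
--     if states == {"cached"}:
--         return "cached"
--     if states == {"fallback"}: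
--         return "fallback"
--     if states == {"unavailable"}:
--         return "unavailable"
--     return "mixed"
-- ===== SOURCE B (Python) =====
-- SOURCE_STATES = {"live", "cached", "fallback", "unavailable"}
--
-- def normalize_source_state(value):
--     if value in SOURCE_STATES:
--         return value
--     return "fallback"
--
-- def aggregate_source_status(sources):
--     if not sources:
--         return "unavailable"
--     it = iter(sources.values())
--     candidate = normalize_source_state(next(it))
--     for value in it:
--         if normalize_source_state(value) != candidate:
--             return "mixed"
--     return candidate
-- ===== Notes on version B (the rewrite author's own statement) =====
-- stated objective: idiomatic
-- what changed: Replaces the set comprehension plus four set-equality checks with a single pass keeping one candidate state and returning 'mixed' on the first mismatch.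
import Mathlib
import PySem

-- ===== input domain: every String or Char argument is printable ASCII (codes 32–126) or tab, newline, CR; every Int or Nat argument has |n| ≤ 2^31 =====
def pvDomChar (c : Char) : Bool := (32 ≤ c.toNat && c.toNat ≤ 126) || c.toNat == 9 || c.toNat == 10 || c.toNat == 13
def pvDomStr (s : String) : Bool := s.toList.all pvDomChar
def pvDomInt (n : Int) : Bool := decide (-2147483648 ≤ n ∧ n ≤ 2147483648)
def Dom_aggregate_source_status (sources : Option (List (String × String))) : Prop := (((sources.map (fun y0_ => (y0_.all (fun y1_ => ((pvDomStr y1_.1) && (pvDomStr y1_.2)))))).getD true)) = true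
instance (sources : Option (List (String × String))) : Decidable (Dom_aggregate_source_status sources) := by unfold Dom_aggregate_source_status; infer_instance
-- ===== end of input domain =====

-- B replaces the set-of-states + four set-equality checks with a single running candidate and an early 'mixed' return (idiomatic, same cost).


-- ===== PORT A =====
-- shared module helper normalize_source_state (value ∈ SOURCE_STATES check)
def pvNorm (v : String) : String :=
  if v = "live" ∨ v = "cached" ∨ v = "fallback" ∨ v = "unavailable" then v else "fallback"

-- the four set-equality checks of A, on the set of normalized states
def pvClassify (states : PySem.Set String) : String :=
  if PySem.Set.equal states (PySem.Set.ofList ["live"]) then "live"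
  else if PySem.Set.equal states (PySem.Set.ofList ["cached"]) then "cached"
  else if PySem.Set.equal states (PySem.Set.ofList ["fallback"]) then "fallback"
  else if PySem.Set.equal states (PySem.Set.ofList ["unavailable"]) then "unavailable"
  else "mixed"

def aggregate_source_status (sources : Option (List (String × String))) : String :=
  match sources with
  | none => "unavailable"                    -- 'if not sources' (None case)
  | some l =>
    let d := PySem.Dict.ofList l
    if d.size = 0 then "unavailable"         -- 'if not sources' (empty dict case)
    else pvClassify (PySem.Set.ofList (d.values.map pvNorm))

-- ===== PORT B =====
-- the for-loop of B: candidate in hand, return "mixed" on first mismatch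
def pvAggLoop (cand : String) : List String → String
  | [] => cand
  | v :: rest => if pvNorm v ≠ cand then "mixed" else pvAggLoop cand rest

def aggregate_source_status_alt (sources : Option (List (String × String))) : String :=
  match sources with
  | none => "unavailable"
  | some l =>
    let d := PySem.Dict.ofList l
    match d.values with
    | [] => "unavailable"                    -- 'if not sources'
    | v :: rest => pvAggLoop (pvNorm v) rest -- candidate := normalized first value

-- ===== PRECONDITION & SPEC =====
def Spec_aggregate_source_status (sources : Option (List (String × String))) (out : String) : Prop := out = aggregate_source_status_alt sources
instance (sources : Option (List (String × String))) (out : String) : Decidable (Spec_aggregate_source_status sources out) := by unfold Spec_aggregate_source_status; infer_instance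

-- ===== CLAIM (what is proved, stated in full; the proofs are below) =====
def Claim_equal_aggregate_source_status : Prop := ∀ (sources : Option (List (String × String))), Dom_aggregate_source_status sources → Spec_aggregate_source_status sources (aggregate_source_status sources)

-- ===== LEMMAS AND PROOFS =====

theorem pvNorm_cases (v : String) :
    pvNorm v = "live" ∨ pvNorm v = "cached" ∨ pvNorm v = "fallback" ∨ pvNorm v = "unavailable" := by
  unfold pvNorm; split_ifs with h
  · tauto
  · tauto

theorem pvAggLoop_all {c : String} {vs : List String} (h : ∀ v ∈ vs, pvNorm v = c) :
    pvAggLoop c vs = c := by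
  induction vs with
  | nil => rfl
  | cons x xs ih =>
    simp only [pvAggLoop]
    rw [if_neg (by simp [h x (by simp)])]
    exact ih (fun v hv => h v (by simp [hv]))

theorem pvAggLoop_mixed {c v : String} {vs : List String} (hv : v ∈ vs) (hne : pvNorm v ≠ c) :
    pvAggLoop c vs = "mixed" := by
  induction vs with
  | nil => cases hv
  | cons x xs ih =>
    simp only [pvAggLoop]
    by_cases hx : pvNorm x ≠ c
    · rw [if_pos hx]
    · rw [if_neg hx]
      rcases List.mem_cons.mp hv with h | h
      · subst h; exact absurd hne hx
      · exact ih h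

theorem pvClassify_single (c : String)
    (hc : c = "live" ∨ c = "cached" ∨ c = "fallback" ∨ c = "unavailable") :
    pvClassify [c] = c := by
  rcases hc with h | h | h | h <;> subst h <;> decide

theorem pvClassify_two {s : PySem.Set String} {a b : String}
    (ha : a ∈ s) (hb : b ∈ s) (hab : a ≠ b) : pvClassify s = "mixed" := by
  have key : ∀ x : String, PySem.Set.equal s [x] ≠ true := by
    intro x hx
    have h := (PySem.Set.equal_iff (s := s) (t := [x])).mp hx
    have h1 : a = x := by simpa using (h a).mp ha
    have h2 : b = x := by simpa using (h b).mp hb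
    exact hab (h1.trans h2.symm)
  unfold pvClassify
  rw [if_neg (by simpa using key "live"), if_neg (by simpa using key "cached"),
      if_neg (by simpa using key "fallback"), if_neg (by simpa using key "unavailable")]

theorem pvMain (v0 : String) (vs : List String) :
    pvClassify (PySem.Set.ofList (pvNorm v0 :: vs.map pvNorm)) = pvAggLoop (pvNorm v0) vs := by
  by_cases hall : ∀ v ∈ vs, pvNorm v = pvNorm v0
  · have hmem : ∀ m ∈ (PySem.Set.ofList (vs.map pvNorm) : List String), m = pvNorm v0 := by
      intro m hm
      rcases List.mem_map.mp ((PySem.Set.mem_ofList _ _).mp hm) with ⟨v, hv, rfl⟩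
      exact hall v hv
    have hdisc : PySem.Set.discard (PySem.Set.ofList (vs.map pvNorm)) (pvNorm v0) = [] := by
      apply List.eq_nil_iff_forall_not_mem.mpr
      intro y hy
      rcases (PySem.Set.mem_discard _ _ _).mp hy with ⟨hy1, hy2⟩
      exact hy2 (hmem y hy1)
    rw [PySem.Set.ofList_cons, hdisc, pvClassify_single _ (pvNorm_cases v0),
        pvAggLoop_all hall]
  · rw [not_forall] at hall; simp only [not_forall, exists_prop] at hall
    rcases hall with ⟨v, hv, hne⟩
    rw [pvAggLoop_mixed hv hne]
    exact pvClassify_two (a := pvNorm v) (b := pvNorm v0)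
      ((PySem.Set.mem_ofList _ _).mpr (by simp; exact Or.inr ⟨v, hv, rfl⟩))
      ((PySem.Set.mem_ofList _ _).mpr (by simp)) hne

-- ===== VERDICT (by name: the statement is the Claim_ definition above) =====
theorem aggregate_source_status_spec : Claim_equal_aggregate_source_status := by
  intro sources _
  unfold Spec_aggregate_source_status
  cases sources with
  | none => rfl
  | some l =>
    simp only [aggregate_source_status, aggregate_source_status_alt]
    cases hd : (PySem.Dict.ofList l).items with
    | nil =>
      simp [PySem.Dict.size, PySem.Dict.values, hd]
    | cons p ps =>
      simp only [PySem.Dict.size, PySem.Dict.values, hd, List.length_cons, List.map_cons]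
      rw [if_neg (by omega)]
      exact pvMain p.2 (ps.map Prod.snd)
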